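-- pv_equiv track=rewrite | github.com/4fthaab/aim26prep | Leetcode Solutions/Reassign Priorities.py | reassignPriorities
-- ===== SOURCE A (Python) =====
-- def reassignPriorities(priorities):
--     vals = sorted(set(priorities))
--
--     mp = {}
--     i = 1
--     for v in vals:
--         mp[v] = i
--         i += 1
--
--     result = []
--     for x in priorities:
--         result.append(mp[x])
--
--     return result
-- ===== SOURCE B (Python) =====
-- def reassignPriorities(priorities):
--     distinct = set(priorities)
--     return [1 + sum(1 for v in distinct if v < x) for x in priorities]
-- ===== Notes on version B (the rewrite author's own statement) =====
-- stated objective: alternative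
-- what changed: Drops the sort and the rank dictionary entirely: each element's rank is computed directly as one plus the count of distinct values strictly below it (counting instead of sorting-and-indexing).
import Mathlib
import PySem

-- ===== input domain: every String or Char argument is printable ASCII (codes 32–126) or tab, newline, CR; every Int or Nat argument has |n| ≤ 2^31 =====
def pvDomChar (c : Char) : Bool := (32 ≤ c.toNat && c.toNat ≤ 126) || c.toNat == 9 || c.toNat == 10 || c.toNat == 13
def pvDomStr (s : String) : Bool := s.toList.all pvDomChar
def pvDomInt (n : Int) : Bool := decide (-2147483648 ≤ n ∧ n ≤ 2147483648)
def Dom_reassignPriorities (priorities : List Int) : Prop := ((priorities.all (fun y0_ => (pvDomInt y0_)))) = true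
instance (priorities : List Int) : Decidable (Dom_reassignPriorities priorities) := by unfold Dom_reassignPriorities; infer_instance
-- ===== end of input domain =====

-- B drops the sort and the rank dictionary: each element's rank is one plus the count of
-- distinct values strictly below it; an alternative counting algorithm (not faster).


-- ===== PORT A =====
-- mp[x] ported as Dict.getD mp x 0: x is always a key of mp (x ∈ priorities ⊆ vals),
-- so Python's KeyError is unreachable and the total lookup is exact (proved below).
def reassignPriorities (priorities : List Int) : List Int :=
  let vals := PySem.List.sorted (PySem.Set.ofList priorities) (fun x => x) false
  let st := vals.foldl
    (fun (acc : PySem.Dict Int Int × Int) v => (acc.1.insert v acc.2, acc.2 + 1))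
    (PySem.Dict.empty, 1)
  priorities.foldl (fun result x => result ++ [st.1.getD x 0]) []

-- ===== PORT B =====
-- sum(1 for v in distinct if v < x) ported as countP over the PySem.Set's element list
def reassignPriorities_alt (priorities : List Int) : List Int :=
  let distinct := PySem.Set.ofList priorities
  priorities.map (fun x => 1 + (distinct.countP (fun v => v < x) : Int))

-- ===== PRECONDITION & SPEC =====
def Spec_reassignPriorities (priorities : List Int) (out : List Int) : Prop := out = reassignPriorities_alt priorities
instance (priorities : List Int) (out : List Int) : Decidable (Spec_reassignPriorities priorities out) := by unfold Spec_reassignPriorities; infer_instance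

-- ===== CLAIM =====
def Claim_equal_reassignPriorities : Prop := ∀ (priorities : List Int), Dom_reassignPriorities priorities → Spec_reassignPriorities priorities (reassignPriorities priorities)

-- ===== LEMMAS AND PROOFS =====

-- a dict fold over a list not containing x leaves x's lookup unchanged
theorem pvFold_getD_not_mem (l : List Int) (d : PySem.Dict Int Int) (i x : Int)
    (hx : x ∉ l) :
    (l.foldl (fun (acc : PySem.Dict Int Int × Int) v => (acc.1.insert v acc.2, acc.2 + 1))
      (d, i)).1.getD x 0 = d.getD x 0 := by
  induction l generalizing d i with
  | nil => rfl
  | cons v t ih =>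
    simp only [List.mem_cons, not_or] at hx
    simp only [List.foldl_cons]
    rw [ih _ _ hx.2, PySem.Dict.getD_insert]
    simp [hx.1]

-- A's counter loop: the dict maps the k-th element of a nodup list to i + k
theorem pvFold_getD_at (l : List Int) (hl : l.Nodup) (d : PySem.Dict Int Int) (i x : Int)
    (k : Nat) (hk : k < l.length) (hx : l[k] = x) :
    (l.foldl (fun (acc : PySem.Dict Int Int × Int) v => (acc.1.insert v acc.2, acc.2 + 1))
      (d, i)).1.getD x 0 = i + k := by
  induction l generalizing d i k with
  | nil => simp at hk
  | cons v t ih =>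
    simp only [List.nodup_cons] at hl
    simp only [List.foldl_cons]
    cases k with
    | zero =>
      simp only [List.getElem_cons_zero] at hx
      subst hx
      rw [pvFold_getD_not_mem t _ _ _ hl.1, PySem.Dict.getD_insert]
      simp
    | succ j =>
      simp only [List.getElem_cons_succ] at hx
      rw [ih hl.2 _ _ j (by simpa using hk) hx]
      push_cast
      ring

-- counting below the k-th element of a strictly increasing list gives k
theorem pvCountP_lt_at (l : List Int) (hs : l.Pairwise (· < ·)) (x : Int)
    (k : Nat) (hk : k < l.length) (hx : l[k] = x) :
    l.countP (fun v => decide (v < x)) = k := by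
  induction l generalizing k with
  | nil => simp at hk
  | cons v t ih =>
    simp only [List.pairwise_cons] at hs
    cases k with
    | zero =>
      simp only [List.getElem_cons_zero] at hx
      subst hx
      rw [List.countP_cons]
      simp only [decide_eq_true_eq, lt_irrefl, if_false, add_zero]
      rw [List.countP_eq_zero]
      intro a ha
      simp only [decide_eq_true_eq]
      exact not_lt.mpr (le_of_lt (hs.1 a ha))
    | succ j =>
      simp only [List.getElem_cons_succ] at hx
      have hjlen : j < t.length := by simpa using hk
      have hvx : v < x := by
        rw [← hx]; exact hs.1 _ (List.getElem_mem hjlen)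
      rw [List.countP_cons]
      simp [ih hs.2 j hjlen hx, hvx]

-- ===== VERDICT =====
theorem reassignPriorities_spec : Claim_equal_reassignPriorities := by
  intro priorities _
  unfold Spec_reassignPriorities reassignPriorities reassignPriorities_alt
  simp only
  set vals := PySem.List.sorted (PySem.Set.ofList priorities) (fun x => x) false with hvals
  have hpair : vals.Pairwise (· < ·) := PySem.List.sorted_ofList_pairwise_lt priorities
  have hperm : vals.Perm (PySem.Set.ofList priorities) :=
    PySem.List.sorted_perm (PySem.Set.ofList priorities) (fun x => x) false
  rw [PySem.List.foldl_append_singleton_eq_map]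
  simp only [List.nil_append]
  apply List.map_congr_left
  intro x hx
  have hxv : x ∈ vals := by
    rw [hvals, PySem.List.mem_sorted, PySem.Set.mem_ofList]
    exact hx
  obtain ⟨k, hk, hkx⟩ := List.mem_iff_getElem.mp hxv
  rw [pvFold_getD_at vals (hpair.nodup) _ 1 x k hk hkx,
      ← hperm.countP_eq, pvCountP_lt_at vals hpair x k hk hkx]
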